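-- pv_equiv track=rewrite | github.com/Soumyadeepaul/Code_Workout | Calculate square of a number.py | calculateSquare
-- ===== SOURCE A (Python) =====
-- def calculateSquare(n):
--     #    Write your code here
--     if n<0:
--         n=-n
--     num=n
--     power=[]
--     i=0
--     while n:
--         rem=n%2
--         n=n//2
--         if rem==1:
--             power.append(i)
--         i+=1
--     result=0
--     while power:
--         p=power.pop()
--         result+=num<<p
--     return result
-- ===== SOURCE B (Python) =====
-- def calculateSquare(n):
--     # Closed form: squaring removes the sign, so n*n equals A's shift-add result.
--     return n * n
-- ===== Notes on version B (the rewrite author's own statement) =====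
-- stated objective: simpler
-- what changed: Replaced the bit-decomposition shift-add loop (collect set-bit positions, then sum num<<p) with the closed form n*n.
import Mathlib
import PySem

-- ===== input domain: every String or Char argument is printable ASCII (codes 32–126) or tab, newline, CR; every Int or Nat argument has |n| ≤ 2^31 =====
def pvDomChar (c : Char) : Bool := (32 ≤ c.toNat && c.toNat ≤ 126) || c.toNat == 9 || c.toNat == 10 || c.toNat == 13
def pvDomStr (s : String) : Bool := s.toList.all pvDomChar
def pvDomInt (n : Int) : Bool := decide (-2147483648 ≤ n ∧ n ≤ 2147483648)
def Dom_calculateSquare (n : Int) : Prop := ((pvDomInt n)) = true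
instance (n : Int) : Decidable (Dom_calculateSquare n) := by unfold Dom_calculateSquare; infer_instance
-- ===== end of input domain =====

-- B replaces A's bit-decomposition shift-add loop with the closed form n*n (simpler).


-- ===== PORT A =====
-- first while loop of A: collect positions of set bits; fuel only makes the
-- recursion total (fuel = n.toNat + 1 suffices for the nonneg n A feeds it)
def csBits (fuel : Nat) (n : Int) (i : Int) (power : List Int) : List Int :=
  match fuel with
  | 0 => power
  | fuel + 1 =>
    if n = 0 then power
    else
      let rem := PySem.Int.mod n 2
      let n' := PySem.Int.floordiv n 2
      let power' := if rem = 1 then power ++ [i] else power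
      csBits fuel n' (i + 1) power'

-- second while loop of A: pop from the end, accumulate num << p
-- (num <<< p ported as num * 2 ^ p.toNat; exact since every p appended is ≥ 0)
def csSum (power : List Int) (num : Int) (result : Int) : Int :=
  match power with
  | [] => result
  | a :: l =>
    csSum ((a :: l).dropLast) num (result + num * 2 ^ ((a :: l).getLast!).toNat)
termination_by power.length
decreasing_by simp

def calculateSquare (n : Int) : Int :=
  let n1 := if n < 0 then -n else n
  let num := n1
  let power := csBits (n1.toNat + 1) n1 0 []
  csSum power num 0

-- ===== PORT B =====
def calculateSquare_alt (n : Int) : Int := n * n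

-- ===== PRECONDITION & SPEC =====
def Spec_calculateSquare (n : Int) (out : Int) : Prop := out = calculateSquare_alt n
instance (n : Int) (out : Int) : Decidable (Spec_calculateSquare n out) := by unfold Spec_calculateSquare; infer_instance

-- ===== CLAIM (what is proved, stated in full; the proofs are below) =====
def Claim_equal_calculateSquare : Prop := ∀ (n : Int), Dom_calculateSquare n → Spec_calculateSquare n (calculateSquare n)

-- ===== LEMMAS AND PROOFS =====

-- value of the pop-and-add loop: result + num * Σ 2^p over the list
theorem csSum_step (p : List Int) (hp : p ≠ []) (num result : Int) :
    csSum p num result = csSum p.dropLast num (result + num * 2 ^ (p.getLast!).toNat) := by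
  cases p with
  | nil => exact absurd rfl hp
  | cons a l => rw [csSum]

theorem csSum_eq (power : List Int) (num : Int) : ∀ result : Int,
    csSum power num result = result + num * (power.map (fun p => (2:Int) ^ p.toNat)).sum := by
  induction power using List.reverseRecOn with
  | nil => intro result; simp [csSum]
  | append_singleton l a ih =>
    intro result
    rw [csSum_step (l ++ [a]) (by simp) num result]
    have h1 : (l ++ [a]).dropLast = l := List.dropLast_concat ..
    have h2 : (l ++ [a]).getLast! = a := by simp
    rw [h1, h2, ih]
    simp [List.map_append, List.sum_append]
    ring

-- value of the bit-collection loop on a natural number with enough fuel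
theorem csBits_sum (fuel : Nat) : ∀ (m : Nat), m < fuel → ∀ (i : Int), 0 ≤ i → ∀ (power : List Int),
    ((csBits fuel (m : Int) i power).map (fun p => (2:Int) ^ p.toNat)).sum
      = (power.map (fun p => (2:Int) ^ p.toNat)).sum + (m : Int) * 2 ^ i.toNat := by
  induction fuel with
  | zero => intro m hm; omega
  | succ fuel ih =>
    intro m hm i hi power
    rw [csBits]
    by_cases h0 : (m : Int) = 0
    · have hz : m = 0 := by exact_mod_cast h0
      subst hz
      simp
    · have hm0 : 0 < m := by
        rcases Nat.eq_zero_or_pos m with h | h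
        · exact absurd (by exact_mod_cast congrArg (Nat.cast : Nat → Int) h) h0
        · exact h
      simp only [h0, if_false]
      have hdiv : PySem.Int.floordiv (m : Int) 2 = ((m / 2 : Nat) : Int) := by
        exact_mod_cast PySem.Int.floordiv_natCast m 2
      have hmod : PySem.Int.mod (m : Int) 2 = ((m % 2 : Nat) : Int) := by
        exact_mod_cast PySem.Int.mod_natCast m 2
      rw [hdiv, hmod]
      have hrec := ih (m / 2) (by omega) (i + 1) (by omega)
      have hit : (i + 1).toNat = i.toNat + 1 := by omega
      by_cases hr : ((m % 2 : Nat) : Int) = 1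
      · have hr' : m % 2 = 1 := by exact_mod_cast hr
        rw [if_pos hr, hrec]
        rw [List.map_append, List.sum_append]
        simp only [List.map_cons, List.map_nil, List.sum_cons, List.sum_nil]
        have hm2 : (m : Int) = 2 * ((m / 2 : Nat) : Int) + 1 := by push_cast; omega
        rw [hit, pow_succ, hm2]; ring
      · have hr' : m % 2 = 0 := by
          have h2 : m % 2 = 0 ∨ m % 2 = 1 := Nat.mod_two_eq_zero_or_one m
          rcases h2 with h2 | h2
          · exact h2
          · exact absurd (by exact_mod_cast congrArg (Nat.cast : Nat → Int) h2) hr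
        rw [if_neg hr, hrec]
        have hm2 : (m : Int) = 2 * ((m / 2 : Nat) : Int) := by push_cast; omega
        rw [hit, pow_succ, hm2]; ring

-- ===== VERDICT (by name: the statement is the Claim_ definition above) =====
theorem calculateSquare_spec : Claim_equal_calculateSquare := by
  intro n _
  unfold Spec_calculateSquare calculateSquare calculateSquare_alt
  set n1 : Int := if n < 0 then -n else n with hn1
  have h1 : 0 ≤ n1 := by rw [hn1]; split <;> omega
  have hcast : ((n1.toNat : Nat) : Int) = n1 := Int.toNat_of_nonneg h1
  have := csBits_sum (n1.toNat + 1) n1.toNat (by omega) 0 (by omega) []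
  rw [hcast] at this
  rw [csSum_eq, this]
  simp
  rw [hn1]; split <;> ring
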